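-- pv_equiv track=rewrite | github.com/khmseu/M6502asm | m6502asm.py | read_angle_block
-- ===== SOURCE A (Python) =====
-- def read_angle_block(text: str, pos: int) -> tuple:
--     """
--     Parse a balanced <...> block starting at pos (pos must be '<').
--     Returns (inner_content, new_pos_after_'>').
--     """
--     assert text[pos] == '<', f"expected '<' at pos {pos}, got {text[pos]!r}"
--     depth = 1
--     pos += 1
--     start = pos
--     while pos < len(text) and depth > 0:
--         c = text[pos]
--         if c == '<':
--             depth += 1
--         elif c == '>':
--             depth -= 1
--         pos += 1
--     return text[start:pos - 1], pos
-- ===== SOURCE B (Python) =====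
-- def read_angle_block(text: str, pos: int) -> tuple:
--     """
--     Parse a balanced <...> block starting at pos (pos must be '<').
--     Returns (inner_content, new_pos_after_'>').
--     Recursive descent over the nesting structure: close(p) returns the
--     cursor just past the '>' that closes the block already open before p
--     (or len(text) if the text runs out); a nested '<' is skipped by a
--     recursive call, so no depth counter is kept at all.
--     """
--     assert text[pos] == '<', f"expected '<' at pos {pos}, got {text[pos]!r}"
--     n = len(text)
--
--     def close(p):
--         while p < n:
--             c = text[p]
--             if c == '>':
--                 return p + 1
--             p = close(p + 1) if c == '<' else p + 1
--         return n
--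
--     start = pos + 1
--     end = close(start)
--     return text[start:end - 1], end
-- ===== Notes on version B (the rewrite author's own statement) =====
-- stated objective: alternative
-- what changed: A's flat scan maintaining an integer depth counter is replaced by recursive descent on the nesting structure: a helper close(p) finds the cursor past the '>' closing the currently open block, calling itself to skip each nested '<...>' block, so no depth variable exists.
import Mathlib
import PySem

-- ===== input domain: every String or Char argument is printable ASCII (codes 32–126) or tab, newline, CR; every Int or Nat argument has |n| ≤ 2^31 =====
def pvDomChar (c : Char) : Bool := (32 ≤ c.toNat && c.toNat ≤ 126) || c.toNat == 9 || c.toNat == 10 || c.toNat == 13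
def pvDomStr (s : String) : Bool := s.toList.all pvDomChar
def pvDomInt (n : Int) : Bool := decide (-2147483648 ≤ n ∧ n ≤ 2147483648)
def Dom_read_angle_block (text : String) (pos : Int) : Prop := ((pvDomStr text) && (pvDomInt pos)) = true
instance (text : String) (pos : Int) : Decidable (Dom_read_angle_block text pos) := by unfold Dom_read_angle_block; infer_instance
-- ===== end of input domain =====

-- B replaces A's flat depth-counter scan by recursive descent on the nesting structure:
-- close(p) returns the cursor past the '>' closing the block open before p, recursing to
-- skip each nested '<...>' block; no depth variable exists.

-- ===== PORT A =====
-- transliteration of A's while loop: an Int cursor scans one character at a time;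
-- text[pos] inside the loop is PySem.List.pyGetD (in range whenever A returns, see Pre_)
def raLoop (cs : List Char) (depth : Nat) (pos : Int) : Int :=
  if h : pos < (cs.length : Int) ∧ 0 < depth then
    if PySem.List.pyGetD cs pos ' ' = '<' then raLoop cs (depth + 1) (pos + 1)
    else if PySem.List.pyGetD cs pos ' ' = '>' then raLoop cs (depth - 1) (pos + 1)
    else raLoop cs depth (pos + 1)
  else pos
termination_by ((cs.length : Int) - pos).toNat
decreasing_by all_goals omega

-- text[start:pos-1] is PySem.Chars.slice (Python semantics for negative bounds)
def read_angle_block (text : String) (pos : Int) : String × Int :=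
  (String.ofList (PySem.Chars.slice text.toList (some (pos + 1))
      (some (raLoop text.toList 1 (pos + 1) - 1))),
    raLoop text.toList 1 (pos + 1))

-- ===== PORT B =====
-- transliteration of B's helper close(p): the while loop and the recursive call for a
-- nested block both become recursion; the Nat fuel only makes the recursion structural
-- (B's recursion terminates; the caller supplies fuel that is proved sufficient below)
def bClose (cs : List Char) : Nat → Int → Int
  | 0, p => p
  | fuel + 1, p =>
    if p < (cs.length : Int) then
      if PySem.List.pyGetD cs p ' ' = '>' then p + 1
      else bClose cs fuel
        (if PySem.List.pyGetD cs p ' ' = '<' then bClose cs fuel (p + 1) else p + 1)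
    else (cs.length : Int)

-- B's local variable end = close(start)
def bEnd (text : String) (pos : Int) : Int :=
  bClose text.toList (((text.toList.length : Int) - (pos + 1)).toNat + 1) (pos + 1)

def read_angle_block_alt (text : String) (pos : Int) : String × Int :=
  (String.ofList (PySem.Chars.slice text.toList (some (pos + 1))
      (some (bEnd text pos - 1))),
    bEnd text pos)

-- ===== PRECONDITION & SPEC =====
-- exactly the inputs on which A returns: pos a valid (possibly negative) Python index
-- of text and text[pos] = '<' (otherwise A raises IndexError / AssertionError)
def Pre_read_angle_block (text : String) (pos : Int) : Prop :=
  PySem.Str.pyGet? text pos = some '<'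
instance (text : String) (pos : Int) : Decidable (Pre_read_angle_block text pos) := by
  unfold Pre_read_angle_block; infer_instance

def pvWitness_read_angle_block : String × Int := ("<a<b>>c", 0)

def Spec_read_angle_block (text : String) (pos : Int) (out : String × Int) : Prop :=
  out = read_angle_block_alt text pos
instance (text : String) (pos : Int) (out : String × Int) : Decidable (Spec_read_angle_block text pos out) := by
  unfold Spec_read_angle_block; infer_instance

-- ===== CLAIM (what is proved, stated in full; the proofs are below) =====
def Claim_equal_read_angle_block : Prop := ∀ (text : String) (pos : Int), Dom_read_angle_block text pos → Pre_read_angle_block text pos → Spec_read_angle_block text pos (read_angle_block text pos)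

-- ===== LEMMAS AND PROOFS =====

-- A's cursor never moves backwards and never passes the end of the text
lemma raLoop_bounds (cs : List Char) : ∀ (k : Nat) (d : Nat) (p : Int),
    ((cs.length : Int) - p).toNat ≤ k → p ≤ (cs.length : Int) →
    p ≤ raLoop cs d p ∧ raLoop cs d p ≤ (cs.length : Int) := by
  intro k
  induction k with
  | zero =>
    intro d p hk hp
    rw [raLoop, dif_neg (by omega)]
    omega
  | succ k ih =>
    intro d p hk hp
    by_cases hlt : p < (cs.length : Int) ∧ 0 < d
    · rw [raLoop, dif_pos hlt]
      split_ifs with h1 h2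
      · have := ih (d + 1) (p + 1) (by omega) (by omega); omega
      · have := ih (d - 1) (p + 1) (by omega) (by omega); omega
      · have := ih d (p + 1) (by omega) (by omega); omega
    · rw [raLoop, dif_neg hlt]; omega

-- peeling one open bracket: scanning at depth d+1 is scanning at depth 1 (to the
-- matching close) and then at depth d from there
lemma raLoop_peel (cs : List Char) : ∀ (k : Nat) (d : Nat) (p : Int),
    ((cs.length : Int) - p).toNat ≤ k → p ≤ (cs.length : Int) →
    raLoop cs (d + 1) p = raLoop cs d (raLoop cs 1 p) := by
  intro k
  induction k with
  | zero =>
    intro d p hk hp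
    have hstop : ∀ dd : Nat, raLoop cs dd p = p := fun dd => by
      rw [raLoop, dif_neg (by omega)]
    rw [hstop, hstop, hstop]
  | succ k ih =>
    intro d p hk hp
    by_cases hlt : p < (cs.length : Int)
    · by_cases h1 : PySem.List.pyGetD cs p ' ' = '<'
      · have hq := raLoop_bounds cs (((cs.length : Int) - (p + 1)).toNat) 1 (p + 1)
          le_rfl (by omega)
        have eL : ∀ dd : Nat, raLoop cs (dd + 1) p = raLoop cs (dd + 1 + 1) (p + 1) :=
          fun dd => by rw [raLoop, dif_pos ⟨hlt, by omega⟩, if_pos h1]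
        have eR : raLoop cs 1 p = raLoop cs 1 (raLoop cs 1 (p + 1)) := by
          have e1 : raLoop cs 1 p = raLoop cs (1 + 1) (p + 1) := by
            rw [raLoop, dif_pos ⟨hlt, by omega⟩, if_pos h1]
          rw [e1, ih 1 (p + 1) (by omega) (by omega)]
        rw [eL d, ih (d + 1) (p + 1) (by omega) (by omega),
            ih d (raLoop cs 1 (p + 1)) (by omega) (by omega), eR]
      · by_cases h2 : PySem.List.pyGetD cs p ' ' = '>'
        · have eL : ∀ dd : Nat, 0 < dd → raLoop cs dd p = raLoop cs (dd - 1) (p + 1) :=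
            fun dd hdd => by
              rw [raLoop, dif_pos ⟨hlt, hdd⟩, if_neg (by rw [h2]; decide), if_pos h2]
          rw [eL (d + 1) (by omega), eL 1 (by omega)]
          have h0 : raLoop cs (1 - 1) (p + 1) = p + 1 := by
            rw [raLoop, dif_neg (by omega)]
          rw [h0, Nat.add_sub_cancel]
        · have eL : ∀ dd : Nat, 0 < dd → raLoop cs dd p = raLoop cs dd (p + 1) :=
            fun dd hdd => by
              rw [raLoop, dif_pos ⟨hlt, hdd⟩, if_neg h1, if_neg h2]
          rw [eL (d + 1) (by omega), eL 1 (by omega)]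
          exact ih d (p + 1) (by omega) (by omega)
    · have hstop : ∀ dd : Nat, raLoop cs dd p = p := fun dd => by
        rw [raLoop, dif_neg (by omega)]
      rw [hstop, hstop, hstop]

-- with sufficient fuel, B's close(p) is A's depth-1 scan from p
lemma bClose_eq (cs : List Char) : ∀ (fuel : Nat) (p : Int),
    ((cs.length : Int) - p).toNat < fuel → p ≤ (cs.length : Int) →
    bClose cs fuel p = raLoop cs 1 p := by
  intro fuel
  induction fuel with
  | zero => intro p hk hp; omega
  | succ fuel ih =>
    intro p hk hp
    by_cases hlt : p < (cs.length : Int)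
    · by_cases h2 : PySem.List.pyGetD cs p ' ' = '>'
      · have eR : raLoop cs 1 p = p + 1 := by
          rw [raLoop, dif_pos ⟨hlt, by omega⟩, if_neg (by rw [h2]; decide), if_pos h2,
              raLoop, dif_neg (by omega)]
        rw [bClose, if_pos hlt, if_pos h2, eR]
      · by_cases h1 : PySem.List.pyGetD cs p ' ' = '<'
        · have hq := raLoop_bounds cs (((cs.length : Int) - (p + 1)).toNat) 1 (p + 1)
            le_rfl (by omega)
          have eR : raLoop cs 1 p = raLoop cs 1 (raLoop cs 1 (p + 1)) := by
            have e1 : raLoop cs 1 p = raLoop cs (1 + 1) (p + 1) := by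
              rw [raLoop, dif_pos ⟨hlt, by omega⟩, if_pos h1]
            rw [e1,
                raLoop_peel cs (((cs.length : Int) - (p + 1)).toNat) 1 (p + 1) le_rfl (by omega)]
          rw [bClose, if_pos hlt, if_neg h2, if_pos h1,
              ih (p + 1) (by omega) (by omega),
              ih (raLoop cs 1 (p + 1)) (by omega) (by omega), eR]
        · have eR : raLoop cs 1 p = raLoop cs 1 (p + 1) := by
            rw [raLoop, dif_pos ⟨hlt, by omega⟩, if_neg h1, if_neg h2]
          rw [bClose, if_pos hlt, if_neg h2, if_neg h1,
              ih (p + 1) (by omega) (by omega), eR]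
    · have hpe : p = (cs.length : Int) := by omega
      rw [bClose, if_neg (by omega), raLoop, dif_neg (by omega), hpe]

-- ===== VERDICT (by name: the statement is the Claim_ definition above) =====
theorem read_angle_block_spec : Claim_equal_read_angle_block := by
  intro text pos _ hpre
  unfold Pre_read_angle_block at hpre
  have hget : PySem.List.pyGet? text.toList pos = some '<' := by
    simpa [PySem.Str.pyGet?] using hpre
  have hrange : -(text.toList.length : Int) ≤ pos ∧ pos < (text.toList.length : Int) := by
    by_contra hc
    rw [(PySem.List.pyGet?_eq_none_iff text.toList pos).2
      (by simp [PySem.Raise.InRange]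
          have hlen : text.toList.length = text.length := by simp
          omega)] at hget
    simp at hget
  unfold Spec_read_angle_block read_angle_block read_angle_block_alt bEnd
  rw [bClose_eq text.toList _ (pos + 1) (by omega) (by omega)]
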